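-- pv_equiv track=rewrite | github.com/zeblithic/harmony | training/ct87/prepare_data.py | concatenate_and_chunk
-- ===== SOURCE A (Python) =====
-- def chunk_stream(stream: list[int], seq_len: int) -> list[list[int]]:
--     """Slice a token stream into non-overlapping fixed-length chunks.
--
--     The final partial chunk (if any) is discarded.
--     """
--     chunks = []
--     for start in range(0, len(stream) - seq_len + 1, seq_len):
--         chunks.append(stream[start : start + seq_len])
--     return chunks
--
-- def concatenate_and_chunk(
--     documents: list[list[int]],
--     seq_len: int,
--     eos_token_id: int,
-- ) -> list[list[int]]:
--     """Concatenate token sequences with EOS separators, then chunk.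
--
--     Documents are joined into one stream: [doc1..., EOS, doc2..., EOS, ...].
--     The stream is sliced into non-overlapping chunks of exactly seq_len
--     tokens. The final partial chunk (if any) is discarded.
--     """
--     stream: list[int] = []
--     for doc in documents:
--         stream.extend(doc)
--         stream.append(eos_token_id)
--
--     return chunk_stream(stream, seq_len)
-- ===== SOURCE B (Python) =====
-- def concatenate_and_chunk(
--     documents: list[list[int]],
--     seq_len: int,
--     eos_token_id: int,
-- ) -> list[list[int]]:
--     """Single streaming pass: fill a buffer token by token (with an EOS after
--     each document) and emit it whenever it reaches seq_len; the trailing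
--     partial buffer is discarded."""
--     chunks: list[list[int]] = []
--     buf: list[int] = []
--     for doc in documents:
--         for tok in doc:
--             buf.append(tok)
--             if len(buf) == seq_len:
--                 chunks.append(buf)
--                 buf = []
--         buf.append(eos_token_id)
--         if len(buf) == seq_len:
--             chunks.append(buf)
--             buf = []
--     return chunks
-- ===== Notes on version B (the rewrite author's own statement) =====
-- stated objective: alternative
-- what changed: Instead of materialising the whole concatenated stream and slicing it at range(0, len-seq_len+1, seq_len) boundaries, B makes one streaming pass that fills a buffer token by token (EOS after each document) and emits it whenever it reaches seq_len, discarding the trailing partial buffer.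
import Mathlib
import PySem

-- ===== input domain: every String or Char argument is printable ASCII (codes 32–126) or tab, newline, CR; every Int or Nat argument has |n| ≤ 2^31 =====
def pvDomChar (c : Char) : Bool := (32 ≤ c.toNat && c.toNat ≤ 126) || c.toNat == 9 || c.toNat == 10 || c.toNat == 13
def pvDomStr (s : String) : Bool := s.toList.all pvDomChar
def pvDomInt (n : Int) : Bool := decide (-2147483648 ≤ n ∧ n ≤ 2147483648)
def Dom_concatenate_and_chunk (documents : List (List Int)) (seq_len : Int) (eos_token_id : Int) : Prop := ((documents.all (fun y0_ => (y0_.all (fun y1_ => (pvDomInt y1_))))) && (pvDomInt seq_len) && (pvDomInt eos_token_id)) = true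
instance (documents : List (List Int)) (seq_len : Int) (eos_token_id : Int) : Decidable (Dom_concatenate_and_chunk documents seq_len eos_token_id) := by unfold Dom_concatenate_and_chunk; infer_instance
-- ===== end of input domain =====

-- B replaces "build the whole concatenated stream, then slice it by ranges" with one
-- streaming pass that flushes a buffer each time it reaches seq_len (objective: alternative
-- decomposition; same O(N) cost, no materialised full stream).

-- ===== PORT A =====
-- helper of A: chunk a stream into non-overlapping seq_len slices, dropping the remainder
def chunk_stream (stream : List Int) (seq_len : Int) : List (List Int) :=
  (PySem.List.pyRange 0 ((stream.length : Int) - seq_len + 1) seq_len).foldl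
    (fun chunks start => chunks ++ [PySem.List.slice stream (some start) (some (start + seq_len))]) []

def concatenate_and_chunk (documents : List (List Int)) (seq_len : Int) (eos_token_id : Int) : List (List Int) :=
  chunk_stream (documents.foldl (fun stream doc => (stream ++ doc) ++ [eos_token_id]) []) seq_len

-- ===== PORT B =====
-- B's per-token step: append the token to the buffer, flush when it reaches seq_len
def cacStep (seq_len : Int) (st : List (List Int) × List Int) (tok : Int) : List (List Int) × List Int :=
  let buf := st.2 ++ [tok]
  if (buf.length : Int) = seq_len then (st.1 ++ [buf], []) else (st.1, buf)

def concatenate_and_chunk_alt (documents : List (List Int)) (seq_len : Int) (eos_token_id : Int) : List (List Int) :=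
  (documents.foldl
    (fun st doc => cacStep seq_len (doc.foldl (cacStep seq_len) st) eos_token_id)
    ([], [])).1

-- ===== PRECONDITION & SPEC =====
-- A raises ValueError when seq_len = 0 (range() with step 0); that is the only exclusion.
def Pre_concatenate_and_chunk (documents : List (List Int)) (seq_len : Int) (eos_token_id : Int) : Prop := seq_len ≠ 0
instance (documents : List (List Int)) (seq_len : Int) (eos_token_id : Int) : Decidable (Pre_concatenate_and_chunk documents seq_len eos_token_id) := by unfold Pre_concatenate_and_chunk; infer_instance

def pvWitness_concatenate_and_chunk : List (List Int) × Int × Int := ([[1, 2], [3]], 2, 0)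

def Spec_concatenate_and_chunk (documents : List (List Int)) (seq_len : Int) (eos_token_id : Int) (out : List (List Int)) : Prop := out = concatenate_and_chunk_alt documents seq_len eos_token_id
instance (documents : List (List Int)) (seq_len : Int) (eos_token_id : Int) (out : List (List Int)) : Decidable (Spec_concatenate_and_chunk documents seq_len eos_token_id out) := by unfold Spec_concatenate_and_chunk; infer_instance

-- ===== CLAIM (what is proved, stated in full; the proofs are below) =====
def Claim_equal_concatenate_and_chunk : Prop := ∀ (documents : List (List Int)) (seq_len : Int) (eos_token_id : Int), Dom_concatenate_and_chunk documents seq_len eos_token_id → Pre_concatenate_and_chunk documents seq_len eos_token_id → Spec_concatenate_and_chunk documents seq_len eos_token_id (concatenate_and_chunk documents seq_len eos_token_id)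


-- ===== LEMMAS AND PROOFS =====

-- reference chunking: take seq_len-sized pieces while enough tokens remain
def chunksRec (n : Nat) (s : List Int) : List (List Int) :=
  if _h : 0 < n ∧ n ≤ s.length then s.take n :: chunksRec n (s.drop n) else []
termination_by s.length
decreasing_by simp; omega

-- B's nested fold over documents is the fold of cacStep over the flattened stream
lemma alt_fold_flat (k e : Int) (documents : List (List Int)) (st : List (List Int) × List Int) :
    documents.foldl (fun st doc => cacStep k (doc.foldl (cacStep k) st) e) st
      = (documents.flatMap (fun d => d ++ [e])).foldl (cacStep k) st := by
  induction documents generalizing st with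
  | nil => simp
  | cons d ds ih => simp [ih, List.foldl_append]

-- A's stream-building fold is that same flattened stream
lemma stream_eq_flat (e : Int) (documents : List (List Int)) :
    documents.foldl (fun stream doc => (stream ++ doc) ++ [e]) []
      = documents.flatMap (fun d => d ++ [e]) := by
  have := PySem.List.foldl_append_eq_flatMap (fun d => d ++ [e]) documents []
  simpa [List.append_assoc] using this

-- streaming invariant: folding cacStep from a short buffer produces exactly chunksRec
lemma fold_cacStep (n : Nat) (hn : 0 < n) :
    ∀ (ts : List Int) (out : List (List Int)) (buf : List Int), buf.length < n →
      (ts.foldl (cacStep (n : Int)) (out, buf)).1 = out ++ chunksRec n (buf ++ ts) := by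
  intro ts
  induction ts with
  | nil =>
      intro out buf hb
      rw [List.foldl_nil, List.append_nil, chunksRec, dif_neg (by omega)]
      simp
  | cons t ts ih =>
      intro out buf hb
      rw [List.foldl_cons]
      by_cases hfull : buf.length + 1 = n
      · have hstep : cacStep (n : Int) (out, buf) t = (out ++ [buf ++ [t]], []) := by
          simp [cacStep]
          omega
        have hbt : (buf ++ [t]).length = n := by simp [hfull]
        have ht : List.take n ((buf ++ [t]) ++ ts) = buf ++ [t] := by
          rw [← hbt, List.take_left]
        have hd : List.drop n ((buf ++ [t]) ++ ts) = ts := by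
          rw [← hbt, List.drop_left]
        have hrhs : chunksRec n (buf ++ t :: ts) = (buf ++ [t]) :: chunksRec n ts := by
          rw [show buf ++ t :: ts = (buf ++ [t]) ++ ts by simp, chunksRec,
              dif_pos ⟨hn, by simp [List.length_append]; omega⟩, ht, hd]
        rw [hstep, ih _ _ (by simpa using hn), hrhs]
        simp
      · have hstep : cacStep (n : Int) (out, buf) t = (out, buf ++ [t]) := by
          simp [cacStep]
          omega
        have hb' : (buf ++ [t]).length < n := by simp [List.length_append]; omega
        rw [hstep, ih _ _ hb']
        simp

-- range() with a negative step and a nonnegative stop is empty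
lemma pyRange_neg_empty (k b : Int) (hk : k < 0) (hb : 0 ≤ b) :
    PySem.List.pyRange 0 b k = [] := by
  unfold PySem.List.pyRange
  have h1 : k ≠ 0 := by omega
  have h2 : ¬ (0 < k) := by omega
  have h3 : ¬ (b < 0) := by omega
  simp [h1, h2, h3]

-- negative seq_len: B never flushes
lemma fold_cacStep_neg (k : Int) (hk : k < 0) :
    ∀ (ts : List Int) (st : List (List Int) × List Int),
      (ts.foldl (cacStep k) st).1 = st.1 := by
  intro ts
  induction ts with
  | nil => intro st; rfl
  | cons t ts ih =>
      intro st
      have h : ((st.2.length : Int) + 1) ≠ k := by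
        have : (0:Int) ≤ (st.2.length : Int) := by positivity
        omega
      simp [List.foldl_cons, cacStep, h, ih]

-- the slice at chunk index j+1 of s is the slice at index j of s with its first chunk dropped
lemma slice_shift (n : Nat) (s : List Int) (j : Nat) :
    PySem.List.slice s (some ((n : Int) * ((j : Int) + 1))) (some ((n : Int) * ((j : Int) + 1) + (n : Int)))
      = PySem.List.slice (s.drop n) (some ((n : Int) * (j : Int))) (some ((n : Int) * (j : Int) + (n : Int))) := by
  have e1 : (n : Int) * ((j : Int) + 1) = ((n * j + n : Nat) : Int) := by push_cast; ring
  have e2 : (n : Int) * ((j : Int) + 1) + (n : Int) = ((n * j + n + n : Nat) : Int) := by push_cast; ring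
  have e3 : (n : Int) * (j : Int) = ((n * j : Nat) : Int) := by push_cast; ring
  have e4 : (n : Int) * (j : Int) + (n : Int) = ((n * j + n : Nat) : Int) := by push_cast; ring
  rw [e2, e1, e4, e3,
      PySem.List.slice_toNat _ (by positivity) (by positivity),
      PySem.List.slice_toNat _ (by positivity) (by positivity),
      List.drop_drop, Int.toNat_natCast, Int.toNat_natCast, Int.toNat_natCast]
  congr 1
  · omega
  · congr 1
    omega

-- mapping the slice over chunk indices produces chunksRec
lemma map_slice_eq_chunksRec (n : Nat) (hn : 0 < n) (s : List Int) :
    (List.range (s.length / n)).map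
      (fun (j : Nat) => PySem.List.slice s (some ((n : Int) * (j : Int))) (some ((n : Int) * (j : Int) + (n : Int))))
      = chunksRec n s := by
  induction hL : s.length using Nat.strong_induction_on generalizing s with
  | _ L IH =>
  subst hL
  by_cases hle : n ≤ s.length
  · rw [chunksRec, dif_pos ⟨hn, hle⟩, Nat.div_eq_sub_div hn hle,
        List.range_succ_eq_map, List.map_cons, List.map_map]
    congr 1
    · rw [show ((n : Int) * ((0 : Nat) : Int)) = ((0 : Nat) : Int) by push_cast; ring,
          PySem.List.slice_toNat _ (by positivity) (by positivity)]
      simp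
    · have hdl : (s.drop n).length = s.length - n := by simp
      rw [← IH (s.drop n).length (by simp; omega) (s.drop n) rfl, hdl]
      apply List.map_congr_left
      intro j _
      simpa using slice_shift n s j
  · rw [chunksRec, dif_neg (by omega), Nat.div_eq_of_lt (by omega)]
    simp

-- A's slice-by-ranges chunking equals chunksRec for positive seq_len
lemma chunk_stream_eq (k : Int) (hk : 0 < k) (s : List Int) :
    chunk_stream s k = chunksRec k.toNat s := by
  have hkc : ((k.toNat : Int)) = k := by omega
  unfold chunk_stream
  rw [PySem.List.pyRange_of_pos 0 _ hk, PySem.List.foldl_append_singleton_eq_map,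
      List.map_map, List.nil_append]
  have hcnt : (if (0 : Int) < (s.length : Int) - k + 1 then
        (((s.length : Int) - k + 1 - 0 + k - 1) / k).toNat else 0) = s.length / k.toNat := by
    split_ifs with h
    · rw [show (s.length : Int) - k + 1 - 0 + k - 1 = (s.length : Int) by ring, ← hkc,
          ← Int.natCast_div, Int.toNat_natCast]
      congr 1
    · exact (Nat.div_eq_of_lt (by omega)).symm
  rw [hcnt, ← map_slice_eq_chunksRec k.toNat (by omega) s]
  apply List.map_congr_left
  intro j _
  simp [hkc]

-- ===== VERDICT (by name: the statement is the Claim_ definition above) =====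
theorem concatenate_and_chunk_spec : Claim_equal_concatenate_and_chunk := by
  intro documents k e _ hk
  unfold Spec_concatenate_and_chunk concatenate_and_chunk concatenate_and_chunk_alt
  rw [alt_fold_flat, stream_eq_flat]
  rcases lt_or_gt_of_ne hk with hneg | hpos
  · rw [fold_cacStep_neg k hneg]
    unfold chunk_stream
    rw [pyRange_neg_empty k _ hneg
      (by have h := Int.natCast_nonneg ((documents.flatMap (fun d => d ++ [e])).length); omega)]
    rfl
  · have hn : 0 < k.toNat := by omega
    have hcast : ((k.toNat : Int)) = k := by omega
    rw [chunk_stream_eq k hpos]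
    have := fold_cacStep k.toNat hn (documents.flatMap (fun d => d ++ [e])) [] [] (by simpa using hn)
    rw [hcast] at this
    simpa using this.symm
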